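-- pv_equiv track=rewrite | github.com/adi1998/FamiliarCostume | pkg_builder.py | _read_7bit_int
-- ===== SOURCE A (Python) =====
-- def _read_7bit_int(data, off):
--     """Read a 7-bit encoded integer (like .NET BinaryReader.Read7BitEncodedInt)."""
--     result = 0
--     shift = 0
--     while True:
--         b = data[off]
--         off += 1
--         result |= (b & 0x7F) << shift
--         if (b & 0x80) == 0:
--             break
--         shift += 7
--     return result, off
-- ===== SOURCE B (Python) =====
-- def _read_7bit_int(data, off):
--     """Read a 7-bit encoded integer, recursively: read one byte; if it is the
--     last group return it, else combine the recursively-read rest on the way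
--     back with (rest << 7) | group.  Same indexing/IndexError as the loop."""
--     b = data[off]
--     if b & 0x80 == 0:
--         return b & 0x7F, off + 1
--     v, end = _read_7bit_int(data, off + 1)
--     return (v << 7) | (b & 0x7F), end
-- ===== Notes on version B (the rewrite author's own statement) =====
-- stated objective: alternative
-- what changed: Replaces the iterative accumulate-with-running-shift loop by a non-tail recursion with no state at all: each call reads one byte and combines the recursively decoded rest on the way back as (rest << 7) | group.
import Mathlib
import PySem

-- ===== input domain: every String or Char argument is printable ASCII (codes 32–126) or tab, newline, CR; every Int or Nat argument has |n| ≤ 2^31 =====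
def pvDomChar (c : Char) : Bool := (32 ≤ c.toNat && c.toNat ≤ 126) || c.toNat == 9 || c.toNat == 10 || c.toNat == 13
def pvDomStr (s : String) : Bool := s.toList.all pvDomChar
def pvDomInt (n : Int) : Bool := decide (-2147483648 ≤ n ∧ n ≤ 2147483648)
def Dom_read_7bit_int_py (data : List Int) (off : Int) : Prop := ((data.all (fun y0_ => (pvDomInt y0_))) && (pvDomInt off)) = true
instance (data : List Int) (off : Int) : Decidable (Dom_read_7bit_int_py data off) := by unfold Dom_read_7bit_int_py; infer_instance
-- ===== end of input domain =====

-- B replaces the stateful loop (running result and shift) by a stateless non-tail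
-- recursion that combines the recursively decoded rest as (rest << 7) | group;
-- objective: alternative decomposition, same cost.

-- ===== PORT A =====
-- A's while loop: reads data[off] (Python indexing, negative wrap; none = IndexError,
-- the port then returns the default (0, 0) and Pre_ excludes exactly those inputs),
-- accumulates result |= (b & 0x7F) << shift.  shift stays nonnegative in every run,
-- so `shift.toNat` is exact for Python's `<< shift`.
def readLoopA (data : List Int) (off result shift : Int) : Option (Int × Int) :=
  match h : PySem.List.pyGet? data off with
  | none => none
  | some b =>
    let result' := PySem.Int.bor result ((PySem.Int.band b 127) <<< shift.toNat)
    if PySem.Int.band b 128 = 0 then some (result', off + 1)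
    else readLoopA data (off + 1) result' (shift + 7)
termination_by (data.length - off).toNat
decreasing_by
  have : ¬ (PySem.List.pyGet? data off = none) := by simp [h]
  rw [PySem.List.pyGet?_eq_none_iff] at this
  have hir : PySem.Raise.InRange data.length off := by tauto
  rcases hir with ⟨-, h2⟩
  omega

def read_7bit_int_py (data : List Int) (off : Int) : Int × Int :=
  (readLoopA data off 0 0).getD (0, 0)

-- ===== PORT B =====
-- B's recursion, step for step; `fuel` is only a totality device: it starts at
-- (len - off).toNat and is exhausted only at indices where data[off] already
-- raises IndexError in Python (proved in recB_fuel_out below), so `none` means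
-- IndexError exactly as in Source B.
def recB (data : List Int) : Nat → Int → Option (Int × Int)
  | 0, _ => none
  | fuel + 1, off =>
    match PySem.List.pyGet? data off with
    | none => none
    | some b =>
      if PySem.Int.band b 128 = 0 then some (PySem.Int.band b 127, off + 1)
      else (recB data fuel (off + 1)).map
             (fun (p : Int × Int) =>
               ((PySem.Int.bor (p.1 <<< (7 : Nat)) (PySem.Int.band b 127) : Int), p.2))

def read_7bit_int_py_alt (data : List Int) (off : Int) : Int × Int :=
  (recB data ((data.length - off).toNat + 1) off).getD (0, 0)

-- ===== PRECONDITION & SPEC =====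
-- Pre_ = exactly the inputs where Python A returns (no IndexError): a byte with clear
-- high bit is reached before running off the end — scanning from off for 0 ≤ off,
-- and for negative off from index off+len to the end and then (Python's negative
-- indices reach 0 and continue from the front) anywhere in the list.
def Pre_read_7bit_int_py (data : List Int) (off : Int) : Prop :=
  if off < 0 then
    -(data.length : Int) ≤ off ∧ data.any (fun b => PySem.Int.band b 128 == 0) = true
  else
    off < data.length ∧ (data.drop off.toNat).any (fun b => PySem.Int.band b 128 == 0) = true
instance (data : List Int) (off : Int) : Decidable (Pre_read_7bit_int_py data off) := by
  unfold Pre_read_7bit_int_py; infer_instance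

def pvWitness_read_7bit_int_py : List Int × Int := ([129, 1], 0)

def Spec_read_7bit_int_py (data : List Int) (off : Int) (out : Int × Int) : Prop := out = read_7bit_int_py_alt data off
instance (data : List Int) (off : Int) (out : Int × Int) : Decidable (Spec_read_7bit_int_py data off out) := by unfold Spec_read_7bit_int_py; infer_instance

-- ===== CLAIM (what is proved, stated in full; the proofs are below) =====
def Claim_equal_read_7bit_int_py : Prop := ∀ (data : List Int) (off : Int), Dom_read_7bit_int_py data off → Pre_read_7bit_int_py data off → Spec_read_7bit_int_py data off (read_7bit_int_py data off)

-- ===== LEMMAS AND PROOFS =====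

theorem band127_nonneg (b : Int) : 0 ≤ PySem.Int.band b 127 := by
  rw [PySem.Int.band_comm]
  exact PySem.Int.band_nonneg_of_nonneg_left _ (by norm_num)

theorem bor_nonneg {a b : Int} (ha : 0 ≤ a) (hb : 0 ≤ b) : 0 ≤ PySem.Int.bor a b := by
  rw [PySem.Int.bor_of_nonneg ha hb]; exact Int.natCast_nonneg _

theorem shiftLeft_nonneg {a : Int} (n : Nat) (ha : 0 ≤ a) : 0 ≤ a <<< n := by
  simp [Int.shiftLeft_eq]; positivity

theorem natCast_shiftLeft (m n : Nat) : ((m : Int) <<< n) = ((m <<< n : Nat) : Int) := by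
  simp [Int.shiftLeft_eq, Nat.shiftLeft_eq]

theorem bor_assoc_nonneg {a b c : Int} (ha : 0 ≤ a) (hb : 0 ≤ b) (hc : 0 ≤ c) :
    PySem.Int.bor (PySem.Int.bor a b) c = PySem.Int.bor a (PySem.Int.bor b c) := by
  lift a to Nat using ha
  lift b to Nat using hb
  lift c to Nat using hc
  rw [PySem.Int.bor_natCast, PySem.Int.bor_natCast, PySem.Int.bor_natCast,
      PySem.Int.bor_natCast, Nat.or_assoc]

theorem bor_shiftLeft_nonneg {a b : Int} (n : Nat) (ha : 0 ≤ a) (hb : 0 ≤ b) :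
    (PySem.Int.bor a b) <<< n = PySem.Int.bor (a <<< n) (b <<< n) := by
  lift a to Nat using ha
  lift b to Nat using hb
  rw [PySem.Int.bor_natCast, natCast_shiftLeft, natCast_shiftLeft, natCast_shiftLeft,
      PySem.Int.bor_natCast, Nat.shiftLeft_or_distrib]

theorem readLoopA_none {data : List Int} {off result shift : Int}
    (h : PySem.List.pyGet? data off = none) : readLoopA data off result shift = none := by
  rw [readLoopA]; split <;> simp_all

theorem readLoopA_some {data : List Int} {off b result shift : Int}
    (h : PySem.List.pyGet? data off = some b) :
    readLoopA data off result shift =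
      (if PySem.Int.band b 128 = 0 then
        some (PySem.Int.bor result ((PySem.Int.band b 127) <<< shift.toNat), off + 1)
       else readLoopA data (off + 1)
              (PySem.Int.bor result ((PySem.Int.band b 127) <<< shift.toNat)) (shift + 7)) := by
  rw [readLoopA]
  split
  · simp_all
  · rename_i b' heq
    rw [h] at heq
    injection heq with heq
    subst heq
    rfl

-- fuel runs out only where data[off] already raises
theorem recB_fuel_out (data : List Int) (off : Int)
    (h : (data.length : Int) - off ≤ 0) : PySem.List.pyGet? data off = none := by
  rw [PySem.List.pyGet?_eq_none_iff]
  intro ⟨h1, h2⟩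
  have : 0 ≤ off := by
    rcases le_or_gt 0 off with h' | h'
    · exact h'
    · exfalso; omega
  omega

theorem recB_none {data : List Int} {fuel : Nat} {off : Int}
    (h : PySem.List.pyGet? data off = none) : recB data (fuel + 1) off = none := by
  rw [recB, h]

theorem recB_some {data : List Int} {fuel : Nat} {off b : Int}
    (h : PySem.List.pyGet? data off = some b) :
    recB data (fuel + 1) off =
      (if PySem.Int.band b 128 = 0 then some (PySem.Int.band b 127, off + 1)
       else (recB data fuel (off + 1)).map
              (fun (p : Int × Int) =>
                ((PySem.Int.bor (p.1 <<< (7 : Nat)) (PySem.Int.band b 127) : Int), p.2))) := by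
  rw [recB, h]

theorem recB_val_nonneg (data : List Int) :
    ∀ (fuel : Nat) (off : Int) (p : Int × Int), recB data fuel off = some p → 0 ≤ p.1 := by
  intro fuel
  induction fuel with
  | zero => intro off p h; simp [recB] at h
  | succ n ih =>
    intro off p h
    cases hg : PySem.List.pyGet? data off with
    | none => rw [recB_none hg] at h; simp at h
    | some b =>
      rw [recB_some hg] at h
      by_cases hc : PySem.Int.band b 128 = 0
      · rw [if_pos hc] at h
        injection h with h
        subst h
        exact band127_nonneg b
      · rw [if_neg hc] at h
        cases hr : recB data n (off + 1) with
        | none => rw [hr] at h; simp at h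
        | some q =>
          rw [hr] at h
          simp only [Option.map_some] at h
          injection h with h
          subst h
          exact bor_nonneg (shiftLeft_nonneg _ (ih (off + 1) q hr)) (band127_nonneg b)

theorem readLoopA_eq_recB (data : List Int) :
    ∀ (fuel : Nat) (off result shift : Int), 0 ≤ result → 0 ≤ shift →
      (data.length : Int) - off ≤ fuel →
      readLoopA data off result shift =
        (recB data fuel off).map
          (fun (p : Int × Int) =>
            ((PySem.Int.bor result (p.1 <<< shift.toNat) : Int), p.2)) := by
  intro fuel
  induction fuel with
  | zero =>
    intro off result shift _ _ hf
    rw [readLoopA_none (recB_fuel_out data off (by exact_mod_cast hf))]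
    rfl
  | succ n ih =>
    intro off result shift hres hsh hf
    cases hg : PySem.List.pyGet? data off with
    | none => rw [readLoopA_none hg, recB_none hg]; rfl
    | some b =>
      rw [readLoopA_some hg, recB_some hg]
      by_cases hc : PySem.Int.band b 128 = 0
      · simp only [if_pos hc, Option.map_some]
      · simp only [if_neg hc]
        have hg127 : (0 : Int) ≤ PySem.Int.band b 127 := band127_nonneg b
        have hres' : 0 ≤ PySem.Int.bor result (PySem.Int.band b 127 <<< shift.toNat) :=
          bor_nonneg hres (shiftLeft_nonneg _ hg127)
        rw [ih (off + 1) _ (shift + 7) hres' (by omega) (by push_cast at hf ⊢; omega)]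
        cases hr : recB data n (off + 1) with
        | none => simp
        | some p =>
          have hp : 0 ≤ p.1 := recB_val_nonneg data n (off + 1) p hr
          simp only [Option.map_some, Option.map_some]
          congr 1
          refine Prod.ext ?_ rfl
          show PySem.Int.bor (PySem.Int.bor result (PySem.Int.band b 127 <<< shift.toNat))
              (p.1 <<< (shift + 7).toNat)
            = PySem.Int.bor result
              ((PySem.Int.bor (p.1 <<< (7 : Nat)) (PySem.Int.band b 127)) <<< shift.toNat)
          have hsn : (shift + 7).toNat = 7 + shift.toNat := by omega
          rw [bor_shiftLeft_nonneg shift.toNat (shiftLeft_nonneg _ hp) hg127,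
              hsn, Int.shiftLeft_add,
              bor_assoc_nonneg hres (shiftLeft_nonneg _ hg127)
                (shiftLeft_nonneg _ (shiftLeft_nonneg _ hp)),
              PySem.Int.bor_comm (PySem.Int.band b 127 <<< shift.toNat)]

theorem ports_agree (data : List Int) (off : Int) :
    read_7bit_int_py data off = read_7bit_int_py_alt data off := by
  unfold read_7bit_int_py read_7bit_int_py_alt
  rw [readLoopA_eq_recB data ((data.length - off).toNat + 1) off 0 0 le_rfl le_rfl
        (by push_cast; omega)]
  cases hr : recB data ((data.length - off).toNat + 1) off with
  | none => rfl
  | some p =>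
    have hp : 0 ≤ p.1 := recB_val_nonneg data _ off p hr
    simp only [Option.map_some, Option.getD_some]
    refine Prod.ext ?_ rfl
    show PySem.Int.bor 0 (p.1 <<< (0 : Int).toNat) = p.1
    rw [PySem.Int.bor_comm, PySem.Int.bor_zero]
    simp

-- ===== VERDICT (by name: the statement is the Claim_ definition above) =====
theorem read_7bit_int_py_spec : Claim_equal_read_7bit_int_py := by
  intro data off _ _
  unfold Spec_read_7bit_int_py
  exact ports_agree data off
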